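-- pv_equiv track=rewrite | github.com/laxmena/hone-1brc | .hone/runs/2026-03-25_002529/snapshots/002900_4098/solution.py | merge_stats
-- ===== SOURCE A (Python) =====
-- def merge_stats(all_stats):
--     merged = {}
--     for stats in all_stats:
--         for station, (mn, mx, total, count) in stats.items():
--             entry = merged.get(station)
--             if entry:
--                 if mn < entry[0]:
--                     entry[0] = mn
--                 if mx > entry[1]:
--                     entry[1] = mx
--                 entry[2] += total
--                 entry[3] += count
--             else:
--                 merged[station] = [mn, mx, total, count]
--     return merged
-- ===== SOURCE B (Python) =====
-- def merge_stats(all_stats):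
--     # Two passes: first group all records per station (first-appearance order),
--     # then aggregate each station's records with min/max/sum.
--     index = {}
--     for stats in all_stats:
--         for station, rec in stats.items():
--             index[station] = index.get(station, []) + [tuple(rec)]
--     return {
--         station: [
--             min(r[0] for r in recs),
--             max(r[1] for r in recs),
--             sum(r[2] for r in recs),
--             sum(r[3] for r in recs),
--         ]
--         for station, recs in index.items()
--     }
-- ===== Notes on version B (the rewrite author's own statement) =====
-- stated objective: alternative
-- what changed: B separates collection from aggregation: a first pass groups every (mn,mx,total,count) record per station into an index dict, a second pass aggregates each station's records with min/max/sum, instead of A's single fused incremental update of a running 4-entry list.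
import Mathlib
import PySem

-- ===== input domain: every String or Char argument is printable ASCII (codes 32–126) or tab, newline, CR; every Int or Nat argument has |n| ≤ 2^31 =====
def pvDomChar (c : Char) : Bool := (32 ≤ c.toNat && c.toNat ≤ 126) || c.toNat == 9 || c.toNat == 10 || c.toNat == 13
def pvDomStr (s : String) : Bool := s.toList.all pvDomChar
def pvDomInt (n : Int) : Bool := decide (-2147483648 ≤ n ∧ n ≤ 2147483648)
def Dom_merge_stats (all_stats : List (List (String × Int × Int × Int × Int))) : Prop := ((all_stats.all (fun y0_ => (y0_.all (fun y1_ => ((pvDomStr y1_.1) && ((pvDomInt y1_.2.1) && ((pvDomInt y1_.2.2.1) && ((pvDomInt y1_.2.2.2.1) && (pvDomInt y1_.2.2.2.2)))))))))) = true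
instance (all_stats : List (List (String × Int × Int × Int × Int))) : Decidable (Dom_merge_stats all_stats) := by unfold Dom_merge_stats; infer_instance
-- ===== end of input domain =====

-- B separates collection (group records per station) from aggregation (min/max/sum per
-- station); A fuses both into one incremental update. Equivalence of return values is proved.

-- ===== PORT A =====
-- one iteration of A's inner loop body: entry = merged.get(station); if entry: mutate; else: insert
def mergeStatsStep (merged : PySem.Dict String (List Int))
    (p : String × Int × Int × Int × Int) : PySem.Dict String (List Int) :=
  match p with
  | (station, mn, mx, total, count) =>
    match merged.get? station with
    | some entry =>
      if entry.isEmpty then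
        -- `if entry:` is false for the empty list (never reached: stored entries have 4 elements)
        merged.insert station [mn, mx, total, count]
      else
        -- in-place mutation of the four cells ≙ overwriting the value at the same key position
        let e0 := entry.getD 0 0
        let e1 := entry.getD 1 0
        let e2 := entry.getD 2 0
        let e3 := entry.getD 3 0
        merged.insert station
          [if mn < e0 then mn else e0, if mx > e1 then mx else e1, e2 + total, e3 + count]
    | none => merged.insert station [mn, mx, total, count]

def merge_stats (all_stats : List (List (String × Int × Int × Int × Int))) : List (String × List Int) :=
  (all_stats.foldl (fun merged stats => stats.foldl mergeStatsStep merged) PySem.Dict.empty).items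

-- ===== PORT B =====
-- min/max/sum aggregation of one station's record list (recs is never empty)
def aggRecs (recs : List (Int × Int × Int × Int)) : List Int :=
  match recs with
  | [] => []
  | r :: rs =>
    [rs.foldl (fun a q => min a q.1) r.1,
     rs.foldl (fun a q => max a q.2.1) r.2.1,
     recs.foldl (fun a q => a + q.2.2.1) 0,
     recs.foldl (fun a q => a + q.2.2.2) 0]

def merge_stats_alt (all_stats : List (List (String × Int × Int × Int × Int))) : List (String × List Int) :=
  let index : PySem.Dict String (List (Int × Int × Int × Int)) :=
    all_stats.foldl
      (fun d stats =>
        stats.foldl (fun d p => d.insert p.1 (d.getD p.1 [] ++ [p.2])) d)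
      PySem.Dict.empty
  index.items.map (fun q => (q.1, aggRecs q.2))

-- ===== PRECONDITION & SPEC =====
def Spec_merge_stats (all_stats : List (List (String × Int × Int × Int × Int))) (out : List (String × List Int)) : Prop := out = merge_stats_alt all_stats
instance (all_stats : List (List (String × Int × Int × Int × Int))) (out : List (String × List Int)) : Decidable (Spec_merge_stats all_stats out) := by unfold Spec_merge_stats; infer_instance

-- ===== CLAIM (what is proved, stated in full; the proofs are below) =====
def Claim_equal_merge_stats : Prop := ∀ (all_stats : List (List (String × Int × Int × Int × Int))), Dom_merge_stats all_stats → Spec_merge_stats all_stats (merge_stats all_stats)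

-- ===== LEMMAS AND PROOFS =====

def pvF (q : String × List (Int × Int × Int × Int)) : String × List Int := (q.1, aggRecs q.2)

def pvInv (d : PySem.Dict String (List (Int × Int × Int × Int)))
    (m : PySem.Dict String (List Int)) : Prop :=
  d.keys.Nodup ∧ m.items = d.items.map pvF ∧ ∀ q ∈ d.items, q.2 ≠ []

lemma pvKeysEq {d : PySem.Dict String (List (Int × Int × Int × Int))}
    {m : PySem.Dict String (List Int)} (h : m.items = d.items.map pvF) : m.keys = d.keys := by
  simp only [PySem.Dict.keys, h, List.map_map]
  rfl

lemma aggRecs_ne_nil (x : Int × Int × Int × Int) (xs : List (Int × Int × Int × Int)) :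
    aggRecs (x :: xs) ≠ [] := by simp [aggRecs]

lemma aggRecs_append (x r : Int × Int × Int × Int) (xs : List (Int × Int × Int × Int)) :
    aggRecs ((x :: xs) ++ [r]) =
      [if r.1 < (aggRecs (x :: xs)).getD 0 0 then r.1 else (aggRecs (x :: xs)).getD 0 0,
       if r.2.1 > (aggRecs (x :: xs)).getD 1 0 then r.2.1 else (aggRecs (x :: xs)).getD 1 0,
       (aggRecs (x :: xs)).getD 2 0 + r.2.2.1,
       (aggRecs (x :: xs)).getD 3 0 + r.2.2.2] := by
  simp only [aggRecs, List.cons_append, List.foldl_append, List.foldl_cons, List.foldl_nil,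
    List.getD, List.getElem?_cons_zero, List.getElem?_cons_succ, Option.getD_some,
    List.cons.injEq, and_true]
  refine ⟨?_, ?_⟩ <;> omega

lemma pvInv_step (d : PySem.Dict String (List (Int × Int × Int × Int)))
    (m : PySem.Dict String (List Int)) (p : String × Int × Int × Int × Int)
    (h : pvInv d m) :
    pvInv (d.insert p.1 (d.getD p.1 [] ++ [p.2])) (mergeStatsStep m p) := by
  obtain ⟨hnd, hitems, hne⟩ := h
  obtain ⟨st, mn, mx, total, count⟩ := p
  have hkeys : m.keys = d.keys := pvKeysEq hitems
  have hndm : m.keys.Nodup := hkeys ▸ hnd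
  by_cases hc : d.contains st = true
  · -- station already present
    have hm : ∃ recs, d.get? st = some recs := by
      cases hg : d.get? st with
      | none => rw [PySem.Dict.get?_eq_none_iff_contains] at hg; simp [hc] at hg
      | some recs => exact ⟨recs, rfl⟩
    obtain ⟨recs, hg⟩ := hm
    have hmemd : (st, recs) ∈ d.items := PySem.Dict.mem_items_of_get?_eq_some _ hg
    obtain ⟨x, xs, rfl⟩ : ∃ x xs, recs = x :: xs := by
      cases recs with
      | nil => exact absurd rfl (hne _ hmemd)
      | cons x xs => exact ⟨x, xs, rfl⟩
    have hmemm : (st, aggRecs (x :: xs)) ∈ m.items := by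
      rw [hitems]; exact List.mem_map.mpr ⟨(st, x :: xs), hmemd, rfl⟩
    have hgm : m.get? st = some (aggRecs (x :: xs)) :=
      PySem.Dict.get?_of_mem_items _ hmemm hndm
    have hgd : d.getD st [] = x :: xs := PySem.Dict.getD_of_get?_eq_some _ _ hg
    have hcm : m.contains st = true := by
      rw [PySem.Dict.contains_iff_mem_keys] at hc ⊢; rw [hkeys]; exact hc
    refine ⟨PySem.Dict.nodup_keys_insert _ _ _ hnd, ?_, ?_⟩
    · simp only [mergeStatsStep, hgm, List.isEmpty_iff, aggRecs_ne_nil, if_false, hgd]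
      rw [PySem.Dict.items_insert_of_contains _ _ hc,
          PySem.Dict.items_insert_of_contains _ _ hcm, hitems, List.map_map, List.map_map]
      refine List.map_congr_left ?_
      intro q _
      by_cases hq : (q.1 == st) = true
      · simp only [Function.comp, pvF, hq, if_true, aggRecs_append]
      · simp [Function.comp, pvF, hq]
    · intro q hqmem
      rcases (PySem.Dict.mem_items_insert _ _ _ _).mp hqmem with hq | hq
      · subst hq; simp [hgd]
      · exact hne _ hq.1
  · -- new station
    have hcd : d.contains st = false := by simpa using hc
    have hg : d.get? st = none := by
      rw [PySem.Dict.get?_eq_none_iff_contains]; exact hcd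
    have hcm : m.contains st = false := by
      have : ¬ m.contains st = true := by
        rw [PySem.Dict.contains_iff_mem_keys, hkeys, ← PySem.Dict.contains_iff_mem_keys]
        exact hc
      simpa using this
    have hgm : m.get? st = none := by
      rw [PySem.Dict.get?_eq_none_iff_contains]; exact hcm
    have hgd : d.getD st [] = [] := PySem.Dict.getD_of_not_contains _ _ hcd
    refine ⟨PySem.Dict.nodup_keys_insert _ _ _ hnd, ?_, ?_⟩
    · simp only [mergeStatsStep, hgm, hgd, List.nil_append]
      rw [PySem.Dict.items_insert_of_not_contains _ _ hcd,
          PySem.Dict.items_insert_of_not_contains _ _ hcm, hitems]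
      simp [pvF, aggRecs]
    · intro q hqmem
      rcases (PySem.Dict.mem_items_insert _ _ _ _).mp hqmem with hq | hq
      · subst hq; simp [hgd]
      · exact hne _ hq.1

lemma pvInv_foldl_inner (ps : List (String × Int × Int × Int × Int))
    (d : PySem.Dict String (List (Int × Int × Int × Int)))
    (m : PySem.Dict String (List Int)) (h : pvInv d m) :
    pvInv (ps.foldl (fun d p => d.insert p.1 (d.getD p.1 [] ++ [p.2])) d)
      (ps.foldl mergeStatsStep m) := by
  induction ps generalizing d m with
  | nil => exact h
  | cons p ps ih => exact ih _ _ (pvInv_step d m p h)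

lemma pvInv_foldl_outer (ls : List (List (String × Int × Int × Int × Int)))
    (d : PySem.Dict String (List (Int × Int × Int × Int)))
    (m : PySem.Dict String (List Int)) (h : pvInv d m) :
    pvInv (ls.foldl (fun d stats =>
        stats.foldl (fun d p => d.insert p.1 (d.getD p.1 [] ++ [p.2])) d) d)
      (ls.foldl (fun merged stats => stats.foldl mergeStatsStep merged) m) := by
  induction ls generalizing d m with
  | nil => exact h
  | cons ps ls ih => exact ih _ _ (pvInv_foldl_inner ps d m h)

-- ===== VERDICT (by name: the statement is the Claim_ definition above) =====
theorem merge_stats_spec : Claim_equal_merge_stats := by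
  intro all_stats _
  have h := pvInv_foldl_outer all_stats PySem.Dict.empty PySem.Dict.empty
    ⟨PySem.Dict.nodup_keys_empty, by simp [PySem.Dict.empty],
     by simp [PySem.Dict.empty]⟩
  unfold Spec_merge_stats merge_stats merge_stats_alt
  exact h.2.1
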